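-- pv_equiv track=rewrite | github.com/vodka0629/Mahjong-2020 | mahjong/mj_math.py | has_orphan
-- ===== SOURCE A (Python) =====
-- def has_orphan(arr):
--     if not arr:
--         return False
--     if len(arr) == 1:
--         return True
--
--     temp = arr[:]
--     temp.sort()
--
--     orphans = []
--     count = len(temp)
--     for index, x in enumerate(temp):
--         if index == 0:
--             if x < temp[index + 1] - 2:
--                 return True
--             continue
--         if index == count - 1:
--             if temp[index - 1] + 2 < x:
--                 return True
--             continue
--         if temp[index - 1] + 2 < x < temp[index + 1] - 2:
--             return True
--     return False
-- ===== SOURCE B (Python) =====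
-- def has_orphan(arr):
--     if not arr:
--         return False
--     run = 1  # length of the current cluster of values with consecutive gaps <= 2
--     prev = None
--     for x in sorted(arr):
--         if prev is not None:
--             if x - prev > 2:
--                 if run == 1:
--                     return True
--                 run = 1
--             else:
--                 run += 1
--         prev = x
--     return run == 1
-- ===== Notes on version B (the rewrite author's own statement) =====
-- stated objective: simpler
-- what changed: Replaces A's indexed scan with a symmetric two-neighbor test plus first/last-index special cases by a single run-length pass over the sorted values that groups them into clusters of consecutive gaps <= 2 and reports a cluster of length exactly 1.
import Mathlib
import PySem

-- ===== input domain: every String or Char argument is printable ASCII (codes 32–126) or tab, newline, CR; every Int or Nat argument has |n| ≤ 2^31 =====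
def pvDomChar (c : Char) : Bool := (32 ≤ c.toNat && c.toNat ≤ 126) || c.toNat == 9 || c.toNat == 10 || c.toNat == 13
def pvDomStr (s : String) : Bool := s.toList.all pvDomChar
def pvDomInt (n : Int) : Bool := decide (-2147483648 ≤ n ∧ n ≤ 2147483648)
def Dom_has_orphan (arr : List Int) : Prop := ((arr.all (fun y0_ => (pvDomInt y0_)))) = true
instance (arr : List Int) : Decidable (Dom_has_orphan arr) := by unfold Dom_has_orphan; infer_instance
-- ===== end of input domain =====

-- has_orphan: B replaces A's indexed two-neighbor test (with first/last special cases)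
-- with a single run-length pass over the sorted values (cluster = consecutive gaps ≤ 2;
-- orphan = a cluster of length 1). Objective: simpler. Neither mutates its argument.


-- ===== PORT A =====
-- the loop with early return 'return True' and final 'return False' is the .any over
-- enumerate(temp); every temp[index±1] access is in range under its branch guard, so
-- pyGetD is exact there.
def has_orphan (arr : List Int) : Bool :=
  if arr = [] then false
  else if arr.length = 1 then true
  else
    let temp := PySem.List.sorted arr (fun x => x) false
    let count := temp.length
    (PySem.List.enumerate temp 0).any (fun p =>
      if p.1 = 0 then decide (p.2 < PySem.List.pyGetD temp (p.1 + 1) 0 - 2)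
      else if p.1 = (count : Int) - 1 then decide (PySem.List.pyGetD temp (p.1 - 1) 0 + 2 < p.2)
      else decide (PySem.List.pyGetD temp (p.1 - 1) 0 + 2 < p.2 ∧
                   p.2 < PySem.List.pyGetD temp (p.1 + 1) 0 - 2))

-- ===== PORT B =====
-- run-length scan: run = length of the current cluster (consecutive sorted gaps ≤ 2);
-- a gap > 2 closes a cluster, a closed (or final) cluster of length 1 is an orphan.
def has_orphan_alt_loop (prev : Int) (run : Nat) : List Int → Bool
  | [] => run = 1
  | x :: rest =>
    if x - prev > 2 then
      if run = 1 then true else has_orphan_alt_loop x 1 rest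
    else has_orphan_alt_loop x (run + 1) rest

def has_orphan_alt (arr : List Int) : Bool :=
  if arr = [] then false
  else
    match PySem.List.sorted arr (fun x => x) false with
    | [] => false
    | x :: rest => has_orphan_alt_loop x 1 rest

-- ===== PRECONDITION & SPEC =====
def Spec_has_orphan (arr : List Int) (out : Bool) : Prop := out = has_orphan_alt arr
instance (arr : List Int) (out : Bool) : Decidable (Spec_has_orphan arr out) := by unfold Spec_has_orphan; infer_instance

-- ===== CLAIM (what is proved, stated in full; the proofs are below) =====
def Claim_equal_has_orphan : Prop := ∀ (arr : List Int), Dom_has_orphan arr → Spec_has_orphan arr (has_orphan arr)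

-- ===== LEMMAS AND PROOFS =====

-- proof-only helper: the window scan both loops reduce to (prev = previous element;
-- an element is an orphan iff both adjacent sorted gaps exceed 2, the last element
-- only needs its left gap to exceed 2).
def winMid (prev : Int) : List Int → Bool
  | [] => false
  | [x] => decide (prev + 2 < x)
  | x :: y :: t => (decide (prev + 2 < x) && decide (x < y - 2)) || winMid x (y :: t)

-- one-step unfolding of B's loop (rfl)
lemma bloop_cons (x : Int) (run : Nat) (z : Int) (l : List Int) :
    has_orphan_alt_loop x run (z :: l) =
      if z - x > 2 then (if run = 1 then true else has_orphan_alt_loop z 1 l)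
      else has_orphan_alt_loop z (run + 1) l := rfl

-- B's loop in terms of winMid, both run-states at once
lemma bloop_char (l : List Int) :
    (∀ (x : Int) (run : Nat), 2 ≤ run → has_orphan_alt_loop x run l = winMid x l) ∧
    (∀ y : Int, has_orphan_alt_loop y 1 l =
      (match l with
       | [] => true
       | z :: _ => decide (z - y > 2) || winMid y l)) := by
  induction l with
  | nil =>
    refine ⟨fun x run h2 => ?_, fun y => ?_⟩
    · simp [has_orphan_alt_loop, winMid]; omega
    · simp [has_orphan_alt_loop]
  | cons z t ih =>
    obtain ⟨ih1, ih2⟩ := ih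
    constructor
    · intro x run h2
      cases t with
      | nil =>
        by_cases hg : z - x > 2 <;>
          simp [has_orphan_alt_loop, winMid, hg] <;> omega
      | cons w t' =>
        by_cases hg : z - x > 2
        · have hx : ¬ run = 1 := by omega
          rw [show winMid x (z :: w :: t') =
            ((decide (x + 2 < z) && decide (z < w - 2)) || winMid z (w :: t')) from rfl]
          rw [bloop_cons, if_pos hg, if_neg hx, ih2 z]
          have : decide (x + 2 < z) = true := by simp; omega
          simp only [this, Bool.true_and]
          cases winMid z (w :: t') <;> (simp; try omega)
        · rw [show winMid x (z :: w :: t') =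
            ((decide (x + 2 < z) && decide (z < w - 2)) || winMid z (w :: t')) from rfl]
          rw [bloop_cons, if_neg hg, ih1 z (run + 1) (by omega)]
          have : decide (x + 2 < z) = false := by simp; omega
          simp [this]
    · intro y
      cases t with
      | nil =>
        by_cases hg : z - y > 2 <;> (simp [has_orphan_alt_loop, winMid, hg]; try omega)
      | cons w t' =>
        rw [show winMid y (z :: w :: t') =
          ((decide (y + 2 < z) && decide (z < w - 2)) || winMid z (w :: t')) from rfl]
        by_cases hg : z - y > 2
        · rw [bloop_cons, if_pos hg, if_pos rfl]
          have h1 : decide (z - y > 2) = true := by simp; omega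
          have h2 : decide (y + 2 < z) = true := by simp; omega
          simp [h1, h2]
        · rw [bloop_cons, if_neg hg, ih1 z 2 (by omega)]
          have h1 : decide (z - y > 2) = false := by simp; omega
          have h2 : decide (y + 2 < z) = false := by simp; omega
          simp [h1, h2]

-- the run=1 start case of bloop_char, with the match reduced
lemma bloop_start (y z : Int) (t : List Int) :
    has_orphan_alt_loop y 1 (z :: t) = (decide (z - y > 2) || winMid y (z :: t)) := by
  have h := (bloop_char (z :: t)).2 y
  simpa using h

-- last element of a prefix, read through getD on the appended list
lemma getD_append_last (pre : List Int) (l : List Int) (prev : Int) (hpre : pre ≠ [])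
    (hlast : pre.getLast hpre = prev) :
    (pre ++ l).getD (pre.length - 1) 0 = prev := by
  have hlen : pre.length - 1 < pre.length := by
    cases pre with | nil => exact absurd rfl hpre | cons a t => simp
  rw [List.getD_eq_getElem?_getD, List.getElem?_append_left hlen,
    List.getElem?_eq_getElem hlen]
  simp [List.getLast_eq_getElem] at hlast ⊢
  exact hlast

-- A's enumerate-scan over a proper suffix (all indices ≥ 1) equals winMid
lemma ascan_eq_winMid (suf : List Int) : ∀ (pre : List Int) (prev : Int)
    (hpre : pre ≠ []) (_ : pre.getLast hpre = prev),
    (PySem.List.enumerate suf (pre.length : Int)).any (fun p =>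
      if p.1 = 0 then decide (p.2 < PySem.List.pyGetD (pre ++ suf) (p.1 + 1) 0 - 2)
      else if p.1 = ((pre ++ suf).length : Int) - 1 then
        decide (PySem.List.pyGetD (pre ++ suf) (p.1 - 1) 0 + 2 < p.2)
      else decide (PySem.List.pyGetD (pre ++ suf) (p.1 - 1) 0 + 2 < p.2 ∧
                   p.2 < PySem.List.pyGetD (pre ++ suf) (p.1 + 1) 0 - 2)) =
    winMid prev suf := by
  induction suf with
  | nil => intro pre prev hpre hlast; simp [winMid]
  | cons x rest ih =>
    intro pre prev hpre hlast
    have hk1 : 1 ≤ pre.length := by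
      cases pre with | nil => exact absurd rfl hpre | cons a t => simp
    have hk0 : ¬ ((pre.length : Int) = 0) := by omega
    have hcast : (pre.length : Int) - 1 = ((pre.length - 1 : Nat) : Int) := by omega
    have hprev : PySem.List.pyGetD (pre ++ x :: rest) ((pre.length : Int) - 1) 0 = prev := by
      rw [hcast, PySem.List.pyGetD_natCast]
      exact getD_append_last pre (x :: rest) prev hpre hlast
    rw [PySem.List.enumerate_cons, List.any_cons]
    cases rest with
    | nil =>
      have hlastidx : (pre.length : Int) = (((pre ++ [x]).length : Nat) : Int) - 1 := by
        simp
      simp only [if_neg hk0, if_pos hlastidx, hprev]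
      simp [winMid]
    | cons y rest' =>
      have hmid : ¬ ((pre.length : Int) = (((pre ++ x :: y :: rest').length : Nat) : Int) - 1) := by
        simp; omega
      have hnext : PySem.List.pyGetD (pre ++ x :: y :: rest') ((pre.length : Int) + 1) 0 = y := by
        have : (pre.length : Int) + 1 = ((pre.length + 1 : Nat) : Int) := by omega
        rw [this, PySem.List.pyGetD_natCast, List.getD_eq_getElem?_getD]
        have : (pre ++ x :: y :: rest')[pre.length + 1]? = (x :: y :: rest')[1]? := by
          rw [show pre.length + 1 = pre.length + 1 from rfl, List.getElem?_append_right (by omega)]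
          congr 1; omega
        rw [this]; rfl
      simp only [if_neg hk0, if_neg hmid, hprev, hnext]
      rw [show winMid prev (x :: y :: rest') =
        ((decide (prev + 2 < x) && decide (x < y - 2)) || winMid x (y :: rest')) from rfl]
      congr 1
      · simp
      · have hpl : (pre.length : Int) + 1 = (((pre ++ [x]).length : Nat) : Int) := by simp
        have hLL : pre ++ x :: y :: rest' = (pre ++ [x]) ++ (y :: rest') := by simp
        rw [hpl, hLL]
        exact ih (pre ++ [x]) x (by simp) (by simp)

-- the sorted list of a ≥2-element list, split into its first two elements
lemma sorted_two_le (arr : List Int) (h : 2 ≤ arr.length) :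
    ∃ a b rest, PySem.List.sorted arr (fun x => x) false = a :: b :: rest := by
  have hl : (PySem.List.sorted arr (fun x => x) false).length = arr.length :=
    PySem.List.length_sorted arr _ false
  cases hs : PySem.List.sorted arr (fun x => x) false with
  | nil => rw [hs] at hl; simp at hl; omega
  | cons a t =>
    cases t with
    | nil => rw [hs] at hl; simp at hl; omega
    | cons b rest => exact ⟨a, b, rest, rfl⟩

-- ===== VERDICT (by name: the statement is the Claim_ definition above) =====
theorem has_orphan_spec : Claim_equal_has_orphan := by
  intro arr _
  unfold Spec_has_orphan has_orphan has_orphan_alt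
  by_cases hnil : arr = []
  · simp [hnil]
  · by_cases h1 : arr.length = 1
    · -- singleton: sorted arr = [x]; B's loop returns (run = 1) = true
      simp only [if_neg hnil, if_pos h1]
      have hl : (PySem.List.sorted arr (fun x => x) false).length = 1 := by
        rw [PySem.List.length_sorted]; exact h1
      cases hs : PySem.List.sorted arr (fun x => x) false with
      | nil => rw [hs] at hl; simp at hl
      | cons x t =>
        rw [hs] at hl; simp at hl
        rw [hl]
        simp [has_orphan_alt_loop]
    · have h2 : 2 ≤ arr.length := by
        match arr, hnil with
        | a :: t, _ =>
          match t, h1 with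
          | b :: t', _ => simp only [List.length_cons]; omega
          | [], h1 => simp at h1
      obtain ⟨a, b, rest, hs⟩ := sorted_two_le arr h2
      simp only [if_neg hnil, if_neg h1, hs]
      -- B side first: the run-length loop in winMid form
      rw [bloop_start a b rest]
      -- A side: peel index 0, then apply the suffix lemma with pre = [a]
      rw [PySem.List.enumerate_cons, List.any_cons]
      congr 1
      · -- the index-0 iteration
        have hfst : PySem.List.pyGetD (a :: b :: rest) (1 : Int) 0 = b := by
          rw [show (1 : Int) = ((1 : Nat) : Int) from rfl, PySem.List.pyGetD_natCast]; rfl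
        have hab : decide (b - a > 2) = decide (a < b - 2) := by
          by_cases hg : b - a > 2
          · have : a < b - 2 := by omega
            simp [hg, this]
          · have : ¬ (a < b - 2) := by omega
            simp [hg, this]
        simp [hfst, hab]
      · -- the remaining iterations, pre = [a]
        rw [show ((0 : Int) + 1) = (([a].length : Nat) : Int) by simp,
            show a :: b :: rest = [a] ++ b :: rest from rfl]
        exact ascan_eq_winMid (b :: rest) [a] a (by simp) (by simp)
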